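-- pv_equiv track=rewrite | github.com/FrancisTan88/PBC | hw5/hw0404_p2.py | find_troughs_wings
-- ===== SOURCE A (Python) =====
-- def find_troughs_wings(inlist, k=2):
--     ans = []
--     n = len(inlist)
--     for i in range(k+1, n-k-1):
--         left, right = i-1, i+1
--         not_bottom = False
--         while left >= i-k and right <= i+k:
--             if inlist[left] <= inlist[left+1] or inlist[right] <= inlist[right-1]:
--                 not_bottom = True
--             left -= 1
--             right += 1
--         if inlist[left] >= inlist[left+1] or inlist[right] >= inlist[right-1]:
--             not_bottom = True
--         if not not_bottom:
--             ans.append(i)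
--     return ans
-- ===== SOURCE B (Python) =====
-- def find_troughs_wings(inlist, k=2):
--     # Precompute run lengths of strict decreases (from the left) and strict
--     # increases (to the right), then test each window without an inner loop.
--     n = len(inlist)
--     if 2 * k + 2 >= n:
--         return []  # no index has k+1 elements on both sides
--     dec = []
--     run = 0
--     prev = None
--     for x in inlist:
--         if prev is not None and prev > x:
--             run += 1
--         else:
--             run = 0
--         dec.append(run)
--         prev = x
--     inc = []
--     run = 0
--     prev = None
--     for x in reversed(inlist):
--         if prev is not None and prev > x:
--             run += 1
--         else:
--             run = 0
--         inc.append(run)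
--         prev = x
--     inc.reverse()
--     ans = []
--     for i in range(k + 1, n - k - 1):
--         if (dec[i] >= k and inc[i] >= k
--                 and inlist[i - k - 1] < inlist[i - k]
--                 and inlist[i + k + 1] < inlist[i + k]):
--             ans.append(i)
--     return ans
-- ===== Notes on version B (the rewrite author's own statement) =====
-- stated objective: alternative
-- what changed: Replaced A's per-index expanding-window rescan by two precomputed run-length arrays (strictly-decreasing-from-left and strictly-increasing-to-right) plus an early return when no index can have k+1 elements on both sides, so each candidate index is tested without an inner loop.
-- outside the precondition, e.g. on find_troughs_wings([2, 1], -1): A returns [0], B raises IndexError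
import Mathlib
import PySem

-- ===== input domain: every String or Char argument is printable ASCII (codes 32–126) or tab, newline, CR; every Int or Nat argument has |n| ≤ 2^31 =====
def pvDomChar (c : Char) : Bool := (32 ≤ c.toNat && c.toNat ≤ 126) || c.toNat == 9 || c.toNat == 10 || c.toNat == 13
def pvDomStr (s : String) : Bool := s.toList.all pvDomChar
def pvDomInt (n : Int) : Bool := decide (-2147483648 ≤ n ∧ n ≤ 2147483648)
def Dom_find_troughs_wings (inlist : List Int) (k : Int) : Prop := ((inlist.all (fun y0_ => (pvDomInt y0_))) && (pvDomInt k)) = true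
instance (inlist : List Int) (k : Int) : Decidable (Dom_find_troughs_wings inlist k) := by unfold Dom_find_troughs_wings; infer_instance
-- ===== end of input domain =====

-- B replaces A's per-index expanding-window rescan by two precomputed strict-run-length arrays, so no candidate index needs an inner loop; equivalence is proved for k ≥ 0 (Pre_).


-- ===== PORT A =====
-- A's while-loop; the fuel argument only makes the recursion total (the loop always exits
-- through its own condition within k.toNat + 1 steps), it never cuts an iteration short.
def pvAWhile (a : List Int) (i k : Int) (left right : Int) (nb : Bool) : Nat → Int × Int × Bool
  | 0 => (left, right, nb)
  | fuel + 1 =>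
    if left ≥ i - k ∧ right ≤ i + k then
      let nb' := if PySem.List.pyGetD a left 0 ≤ PySem.List.pyGetD a (left + 1) 0 ∨
                    PySem.List.pyGetD a right 0 ≤ PySem.List.pyGetD a (right - 1) 0 then true else nb
      pvAWhile a i k (left - 1) (right + 1) nb' fuel
    else (left, right, nb)

def find_troughs_wings (inlist : List Int) (k : Int) : List Int :=
  let n : Int := inlist.length
  (PySem.List.pyRange (k + 1) (n - k - 1) 1).foldl (fun ans i =>
    let r := pvAWhile inlist i k (i - 1) (i + 1) false (k.toNat + 1)
    let left := r.1
    let right := r.2.1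
    let nb := if PySem.List.pyGetD inlist left 0 ≥ PySem.List.pyGetD inlist (left + 1) 0 ∨
                 PySem.List.pyGetD inlist right 0 ≥ PySem.List.pyGetD inlist (right - 1) 0 then true else r.2.2
    if nb then ans else ans ++ [i]) []

-- ===== PORT B =====
-- one step of Source B's run-length loop: state = (list built so far, current run, previous element)
def pvRunStep (st : List Int × Int × Option Int) (x : Int) : List Int × Int × Option Int :=
  let run : Int := match st.2.2 with
    | some p => if p > x then st.2.1 + 1 else 0
    | none => 0
  (st.1 ++ [run], run, some x)
def pvRuns (xs : List Int) : List Int := (xs.foldl pvRunStep ([], 0, none)).1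
def find_troughs_wings_alt (inlist : List Int) (k : Int) : List Int :=
  let n : Int := inlist.length
  if 2 * k + 2 ≥ n then [] else
  let dec := pvRuns inlist
  let inc := (pvRuns inlist.reverse).reverse
  (PySem.List.pyRange (k + 1) (n - k - 1) 1).foldl (fun ans i =>
    if PySem.List.pyGetD dec i 0 ≥ k ∧ PySem.List.pyGetD inc i 0 ≥ k ∧
       PySem.List.pyGetD inlist (i - k - 1) 0 < PySem.List.pyGetD inlist (i - k) 0 ∧
       PySem.List.pyGetD inlist (i + k + 1) 0 < PySem.List.pyGetD inlist (i + k) 0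
    then ans ++ [i] else ans) []

-- ===== PRECONDITION & SPEC =====
-- Pre_ excludes negative k, on which A either raises IndexError or returns indices only via Python's
-- negative-index wraparound (an artefact of A's implementation); B's natural code raises IndexError there.
def Pre_find_troughs_wings (inlist : List Int) (k : Int) : Prop := 0 ≤ k
instance (inlist : List Int) (k : Int) : Decidable (Pre_find_troughs_wings inlist k) := by
  unfold Pre_find_troughs_wings; infer_instance

def pvWitness_find_troughs_wings : List Int × Int := ([5, 3, 1, 0, 2, 4, 1], 2)

def Spec_find_troughs_wings (inlist : List Int) (k : Int) (out : List Int) : Prop :=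
  out = find_troughs_wings_alt inlist k
instance (inlist : List Int) (k : Int) (out : List Int) : Decidable (Spec_find_troughs_wings inlist k out) := by
  unfold Spec_find_troughs_wings; infer_instance

-- ===== CLAIM (what is proved, stated in full; the proofs are below) =====
def Claim_equal_find_troughs_wings : Prop := ∀ (inlist : List Int) (k : Int), Dom_find_troughs_wings inlist k → Pre_find_troughs_wings inlist k → Spec_find_troughs_wings inlist k (find_troughs_wings inlist k)

-- ===== LEMMAS AND PROOFS =====
-- run value appended by one more element (used only by the proofs)
def pvNext (xs : List Int) (x : Int) : Int :=
  match xs.getLast? with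
  | some p => if p > x then (pvRuns xs).getLastD 0 + 1 else 0
  | none => 0

-- violation of the strict-trough shape at offset u from the centre i (A's while-loop test)
def pvViol (a : List Int) (i : Int) (u : Nat) : Bool :=
  decide (PySem.List.pyGetD a (i - 1 - u) 0 ≤ PySem.List.pyGetD a (i - u) 0 ∨
          PySem.List.pyGetD a (i + 1 + u) 0 ≤ PySem.List.pyGetD a (i + u) 0)

lemma pvRuns_state (xs : List Int) :
    xs.foldl pvRunStep ([], 0, none) = (pvRuns xs, (pvRuns xs).getLastD 0, xs.getLast?) := by
  induction xs using List.reverseRecOn with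
  | nil => rfl
  | append_singleton xs x ih =>
    have hruns : pvRuns (xs ++ [x]) = pvRuns xs ++ [pvNext xs x] := by
      rw [pvRuns, List.foldl_append, List.foldl_cons, List.foldl_nil, ih]
      cases hl : xs.getLast? <;> simp [pvRunStep, pvNext, hl]
    rw [List.foldl_append, List.foldl_cons, List.foldl_nil, ih, hruns]
    cases hl : xs.getLast? <;>
      simp [pvRunStep, pvNext, hl]

lemma pvRuns_snoc (xs : List Int) (x : Int) :
    pvRuns (xs ++ [x]) = pvRuns xs ++ [pvNext xs x] := by
  rw [pvRuns, List.foldl_append, List.foldl_cons, List.foldl_nil, pvRuns_state]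
  cases hl : xs.getLast? <;> simp [pvRunStep, pvNext, hl]

lemma pvRuns_length (xs : List Int) : (pvRuns xs).length = xs.length := by
  induction xs using List.reverseRecOn with
  | nil => rfl
  | append_singleton xs x ih => simp [pvRuns_snoc, ih]

lemma pvRuns_nonneg (xs : List Int) : ∀ v ∈ pvRuns xs, 0 ≤ v := by
  induction xs using List.reverseRecOn with
  | nil => simp [pvRuns]
  | append_singleton xs x ih =>
    intro v hv
    rw [pvRuns_snoc] at hv
    rcases List.mem_append.1 hv with h | h
    · exact ih v h
    · simp only [List.mem_singleton] at h
      subst h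
      have hlast : 0 ≤ (pvRuns xs).getLastD 0 := by
        cases hpr : pvRuns xs with
        | nil => simp
        | cons a t =>
          have hmem : (a :: t).getLast (List.cons_ne_nil a t) ∈ a :: t := List.getLast_mem _
          have hnn := ih _ (by rw [hpr]; exact hmem)
          have : (a :: t).getLastD 0 = (a :: t).getLast (List.cons_ne_nil a t) := by
            rw [List.getLastD_eq_getLast?,
              List.getLast?_eq_some_getLast (List.cons_ne_nil a t)]
            rfl
          rw [this]; exact hnn
      unfold pvNext
      cases hl : xs.getLast? with
      | none => simp
      | some p => simp only; split <;> omega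

lemma pvGetLastD_eq_getD (l : List Int) (h : l ≠ []) :
    l.getLastD 0 = l.getD (l.length - 1) 0 := by
  simp [List.getLastD_eq_getLast?, List.getLast?_eq_getElem?, List.getD_eq_getElem?_getD]

lemma pvRuns_getD_zero (xs : List Int) (h : xs ≠ []) : (pvRuns xs).getD 0 0 = 0 := by
  induction xs using List.reverseRecOn with
  | nil => simp at h
  | append_singleton xs x ih =>
    rw [pvRuns_snoc]
    rcases eq_or_ne xs [] with rfl | hne
    · simp [pvNext, pvRuns]
    · have hlen : 0 < (pvRuns xs).length := by
        rw [pvRuns_length]; exact List.length_pos_of_ne_nil hne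
      rw [List.getD_append _ _ _ _ hlen]
      exact ih hne

lemma pvRuns_getD_succ (xs : List Int) (j : Nat) (h : j + 1 < xs.length) :
    (pvRuns xs).getD (j + 1) 0 =
      if xs.getD j 0 > xs.getD (j + 1) 0 then (pvRuns xs).getD j 0 + 1 else 0 := by
  induction xs using List.reverseRecOn with
  | nil => simp at h
  | append_singleton xs x ih =>
    have hlenr : (pvRuns xs).length = xs.length := pvRuns_length xs
    rcases lt_or_eq_of_le (Nat.lt_succ_iff.mp (by simpa using h)) with hlt | heq
    · -- j + 1 < xs.length : everything inside the prefix
      rw [pvRuns_snoc,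
          List.getD_append _ _ _ _ (by omega),
          List.getD_append _ _ _ _ (by omega),
          List.getD_append _ _ _ _ (by omega),
          List.getD_append _ _ _ _ (by omega)]
      exact ih hlt
    · -- j + 1 = xs.length : the new element
      have hne : xs ≠ [] := by intro hnil; rw [hnil] at heq; simp at heq
      have hj : j = xs.length - 1 := by omega
      rw [pvRuns_snoc]
      have heq2 : j + 1 = xs.length := by omega
      have h1 : (pvRuns xs ++ [pvNext xs x]).getD (j + 1) 0 = pvNext xs x := by
        rw [heq2, ← hlenr]
        simp [List.getD_eq_getElem?_getD]
      have h2 : (pvRuns xs ++ [pvNext xs x]).getD j 0 = (pvRuns xs).getD j 0 :=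
        List.getD_append _ _ _ _ (by omega)
      have h3 : (xs ++ [x]).getD j 0 = xs.getD j 0 :=
        List.getD_append _ _ _ _ (by omega)
      have h4 : (xs ++ [x]).getD (j + 1) 0 = x := by
        rw [heq2]; simp [List.getD_eq_getElem?_getD]
      rw [h1, h2, h3, h4]
      have h5 : xs.getLast? = some (xs.getD j 0) := by
        rw [List.getLast?_eq_getElem?, hj]
        rw [List.getD_eq_getElem?_getD]
        rw [List.getElem?_eq_getElem (by omega)]
        rfl
      unfold pvNext
      rw [h5]
      simp only
      rw [pvGetLastD_eq_getD _ (by simp [← List.length_pos_iff, hlenr]; exact List.length_pos_of_ne_nil hne), hlenr, ← hj]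

lemma pvRuns_getD_ge (xs : List Int) :
    ∀ (m j : Nat), j < xs.length →
      ((m : Int) ≤ (pvRuns xs).getD j 0 ↔
        m ≤ j ∧ ∀ u < m, xs.getD (j - 1 - u) 0 > xs.getD (j - u) 0) := by
  intro m
  induction m with
  | zero =>
    intro j hj
    have hjlen : j < (pvRuns xs).length := by rw [pvRuns_length]; exact hj
    have : (pvRuns xs).getD j 0 = (pvRuns xs)[j] := List.getD_eq_getElem _ _ hjlen
    have hnn := pvRuns_nonneg xs _ (List.getElem_mem hjlen)
    rw [this] at *
    simp only [Nat.cast_zero]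
    exact iff_of_true hnn ⟨Nat.zero_le _, by omega⟩
  | succ m ih =>
    intro j hj
    cases j with
    | zero =>
      have h0 : (pvRuns xs).getD 0 0 = 0 :=
        pvRuns_getD_zero xs (List.ne_nil_of_length_pos hj)
      rw [h0]
      constructor
      · intro h; exfalso; omega
      · rintro ⟨h, -⟩; exact absurd h (by omega)
    | succ j' =>
      rw [pvRuns_getD_succ xs j' hj]
      have hj' : j' < xs.length := by omega
      split
      · rename_i hcond
        constructor
        · intro h
          have hm : (m : Int) ≤ (pvRuns xs).getD j' 0 := by omega
          obtain ⟨hle, hall⟩ := (ih j' hj').mp hm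
          refine ⟨by omega, ?_⟩
          intro u hu
          match u with
          | 0 => simpa using hcond
          | u + 1 =>
            have := hall u (by omega)
            rw [show j' + 1 - 1 - (u + 1) = j' - 1 - u from by omega,
                show j' + 1 - (u + 1) = j' - u from by omega]
            exact this
        · rintro ⟨hle, hall⟩
          have hm : (m : Int) ≤ (pvRuns xs).getD j' 0 := by
            refine (ih j' hj').mpr ⟨by omega, ?_⟩
            intro u hu
            have := hall (u + 1) (by omega)
            rw [show j' + 1 - 1 - (u + 1) = j' - 1 - u from by omega,
                show j' + 1 - (u + 1) = j' - u from by omega] at this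
            exact this
          omega
      · rename_i hcond
        constructor
        · intro h; exfalso; omega
        · rintro ⟨hle, hall⟩
          exfalso
          have := hall 0 (by omega)
          simp at this
          exact hcond (by simpa using this)

lemma pvAWhile_spec (a : List Int) (i k : Int) (hk : 0 ≤ k) :
    ∀ (fuel t : Nat) (nb : Bool), (t : Int) ≤ k → k.toNat - t < fuel →
      pvAWhile a i k (i - 1 - t) (i + 1 + t) nb fuel =
        (i - k - 1, i + k + 1,
          nb || (List.range (k.toNat - t)).any (fun s => pvViol a i (t + s))) := by
  intro fuel
  induction fuel with
  | zero => intro t nb _ hf; omega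
  | succ fuel ih =>
    intro t nb ht hf
    rcases lt_or_ge (t : Int) k with h | h
    · have hcond : i - 1 - (t:Int) ≥ i - k ∧ i + 1 + (t:Int) ≤ i + k := by omega
      simp only [pvAWhile, if_pos hcond]
      have e1 : i - 1 - (t:Int) + 1 = i - t := by ring
      have e2 : i + 1 + (t:Int) - 1 = i + t := by ring
      rw [e1, e2]
      have e3 : i - 1 - (t:Int) - 1 = i - 1 - ((t+1 : Nat) : Int) := by push_cast; ring
      have e4 : i + 1 + (t:Int) + 1 = i + 1 + ((t+1 : Nat) : Int) := by push_cast; ring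
      rw [e3, e4, ih (t+1) _ (by push_cast; omega) (by omega)]
      have hnb' : (if PySem.List.pyGetD a (i - 1 - (t:Int)) 0 ≤ PySem.List.pyGetD a (i - (t:Int)) 0 ∨
                      PySem.List.pyGetD a (i + 1 + (t:Int)) 0 ≤ PySem.List.pyGetD a (i + (t:Int)) 0
                   then true else nb) = (nb || pvViol a i t) := by
        unfold pvViol
        split <;> rename_i hx
        · simp [hx]
        · simp [hx]
      rw [hnb']
      have hrange : k.toNat - t = (k.toNat - (t+1)) + 1 := by omega
      rw [hrange, List.range_succ_eq_map]
      simp only [List.any_cons, List.any_map]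
      have hcomp : ((fun s => pvViol a i (t + s)) ∘ Nat.succ) = (fun s => pvViol a i (t + 1 + s)) := by
        funext s
        simp only [Function.comp_apply]
        rw [show t + Nat.succ s = t + 1 + s from by omega]
      rw [hcomp, show t + 0 = t from rfl]
      cases nb <;> cases pvViol a i t <;> simp
    · have ht' : (t : Int) = k := by omega
      have hcond : ¬(i - 1 - (t:Int) ≥ i - k ∧ i + 1 + (t:Int) ≤ i + k) := by omega
      simp only [pvAWhile, if_neg hcond]
      have : k.toNat - t = 0 := by omega
      rw [this]
      simp [List.range_zero]
      constructor <;> omega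

lemma pvGetD_cast (a : List Int) (z : Int) (m : Nat) (h : z = (m : Int)) :
    PySem.List.pyGetD a z 0 = a.getD m 0 := by
  subst h; simp [PySem.List.pyGetD_natCast]

lemma pvGetD_reverse (l : List Int) (p : Nat) (hp : p < l.length) :
    l.reverse.getD p 0 = l.getD (l.length - 1 - p) 0 := by
  rw [List.getD_eq_getElem _ _ (by simpa using hp), List.getElem_reverse,
      List.getD_eq_getElem _ _ (by omega)]

lemma pvCond_iff (a : List Int) (k : Int) (hk : 0 ≤ k) (i : Int)
    (h1 : k + 1 ≤ i) (h2 : i < (a.length : Int) - k - 1) :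
    (((List.range k.toNat).any fun s => pvViol a i s) = false ↔
      (k ≤ PySem.List.pyGetD (pvRuns a) i 0 ∧
       k ≤ PySem.List.pyGetD ((pvRuns a.reverse).reverse) i 0)) := by
  obtain ⟨iN, rfl⟩ : ∃ m : Nat, i = (m : Int) :=
    ⟨i.toNat, (Int.toNat_of_nonneg (by omega)).symm⟩
  have hkN : ((k.toNat : Int)) = k := Int.toNat_of_nonneg hk
  have hb1 : k.toNat + 1 ≤ iN := by omega
  have hb2 : iN + k.toNat + 2 ≤ a.length := by omega
  have key : ∀ u : Nat, u < k.toNat →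
      (pvViol a (iN : Int) u = false ↔
        (a.getD (iN - 1 - u) 0 > a.getD (iN - u) 0 ∧
         a.getD (iN + 1 + u) 0 > a.getD (iN + u) 0)) := by
    intro u hu
    unfold pvViol
    rw [pvGetD_cast a _ (iN - 1 - u) (by omega), pvGetD_cast a _ (iN - u) (by omega),
        pvGetD_cast a _ (iN + 1 + u) (by omega), pvGetD_cast a _ (iN + u) (by omega)]
    simp [not_or]
  have hLHS : (((List.range k.toNat).any fun s => pvViol a (iN : Int) s) = false) ↔
      ∀ u < k.toNat, (a.getD (iN - 1 - u) 0 > a.getD (iN - u) 0 ∧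
        a.getD (iN + 1 + u) 0 > a.getD (iN + u) 0) := by
    rw [List.any_eq_false]
    constructor
    · intro h u hu
      exact (key u hu).mp (Bool.eq_false_iff.mpr (h u (List.mem_range.mpr hu)))
    · intro h u hu
      exact Bool.eq_false_iff.mp ((key u (List.mem_range.mp hu)).mpr (h u (List.mem_range.mp hu)))
  have hdec : (k ≤ PySem.List.pyGetD (pvRuns a) (iN : Int) 0) ↔
      ∀ u < k.toNat, a.getD (iN - 1 - u) 0 > a.getD (iN - u) 0 := by
    rw [pvGetD_cast _ _ iN rfl, ← hkN,
        pvRuns_getD_ge a k.toNat iN (by omega)]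
    constructor
    · rintro ⟨-, h⟩; exact h
    · intro h; exact ⟨by omega, h⟩
  have hlenrev : (pvRuns a.reverse).length = a.length := by
    rw [pvRuns_length, List.length_reverse]
  have hinc : (k ≤ PySem.List.pyGetD ((pvRuns a.reverse).reverse) (iN : Int) 0) ↔
      ∀ u < k.toNat, a.getD (iN + 1 + u) 0 > a.getD (iN + u) 0 := by
    rw [pvGetD_cast _ _ iN rfl, pvGetD_reverse (pvRuns a.reverse) iN (by omega),
        hlenrev, ← hkN,
        pvRuns_getD_ge a.reverse k.toNat (a.length - 1 - iN)
          (by rw [List.length_reverse]; omega)]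
    have hclause : ∀ u : Nat, u < k.toNat →
        (a.reverse.getD (a.length - 1 - iN - 1 - u) 0 > a.reverse.getD (a.length - 1 - iN - u) 0 ↔
         a.getD (iN + 1 + u) 0 > a.getD (iN + u) 0) := by
      intro u hu
      rw [pvGetD_reverse a (a.length - 1 - iN - 1 - u) (by omega),
          pvGetD_reverse a (a.length - 1 - iN - u) (by omega),
          show a.length - 1 - (a.length - 1 - iN - 1 - u) = iN + 1 + u from by omega,
          show a.length - 1 - (a.length - 1 - iN - u) = iN + u from by omega]
    constructor
    · rintro ⟨-, h⟩ u hu; exact (hclause u hu).mp (h u hu)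
    · intro h; exact ⟨by omega, fun u hu => (hclause u hu).mpr (h u hu)⟩
  rw [hLHS, hdec, hinc]
  constructor
  · intro h
    exact ⟨fun u hu => (h u hu).1, fun u hu => (h u hu).2⟩
  · rintro ⟨hl, hr⟩ u hu
    exact ⟨hl u hu, hr u hu⟩

lemma find_troughs_wings_eq_alt (a : List Int) (k : Int) (hk : 0 ≤ k) :
    find_troughs_wings a k = find_troughs_wings_alt a k := by
  simp only [find_troughs_wings, find_troughs_wings_alt]
  by_cases hemp : 2 * k + 2 ≥ (a.length : Int)
  · rw [if_pos hemp, PySem.List.pyRange_one_eq_nil (by omega), List.foldl_nil]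
  · rw [if_neg hemp]
    apply PySem.List.foldl_congr_mem
    intro ans i hi
    rw [PySem.List.mem_pyRange_one] at hi
    obtain ⟨hi1, hi2⟩ := hi
    have hA := pvAWhile_spec a i k hk (k.toNat + 1) 0 false (by exact_mod_cast hk) (by omega)
    simp only [Nat.cast_zero, sub_zero, add_zero, Nat.sub_zero, Bool.false_or,
      Nat.zero_add] at hA
    simp only [hA]
    have e1 : i - k - 1 + 1 = i - k := by ring
    have e2 : i + k + 1 - 1 = i + k := by ring
    rw [e1, e2]
    have hiff := pvCond_iff a k hk i hi1 (by exact_mod_cast hi2)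
    by_cases hout : PySem.List.pyGetD a (i - k - 1) 0 ≥ PySem.List.pyGetD a (i - k) 0 ∨
        PySem.List.pyGetD a (i + k + 1) 0 ≥ PySem.List.pyGetD a (i + k) 0
    · rw [if_pos hout, if_pos rfl, if_neg]
      rintro ⟨-, -, h3, h4⟩
      rcases hout with h | h
      · exact absurd h3 (not_lt.mpr h)
      · exact absurd h4 (not_lt.mpr h)
    · push_neg at hout
      have hnout : ¬(PySem.List.pyGetD a (i - k - 1) 0 ≥ PySem.List.pyGetD a (i - k) 0 ∨
          PySem.List.pyGetD a (i + k + 1) 0 ≥ PySem.List.pyGetD a (i + k) 0) := by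
        exact not_or.mpr ⟨not_le.mpr hout.1, not_le.mpr hout.2⟩
      rw [if_neg hnout]
      cases hV : ((List.range k.toNat).any fun s => pvViol a i s) with
      | false =>
        obtain ⟨c1, c2⟩ := hiff.mp hV
        rw [if_neg Bool.false_ne_true, if_pos ⟨c1, c2, hout.1, hout.2⟩]
      | true =>
        rw [if_pos rfl, if_neg]
        rintro ⟨c1, c2, -, -⟩
        rw [hiff.mpr ⟨c1, c2⟩] at hV
        exact Bool.false_ne_true hV

-- ===== VERDICT (by name: the statement is the Claim_ definition above) =====
theorem find_troughs_wings_spec : Claim_equal_find_troughs_wings := by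
  intro inlist k _ hpre
  unfold Pre_find_troughs_wings at hpre
  unfold Spec_find_troughs_wings
  exact find_troughs_wings_eq_alt inlist k hpre
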